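-- pv_equiv track=rewrite | github.com/asheemsiwach08/homi_apis | app/api/endpoints/whatsapp.py | is_status_check_request
-- ===== SOURCE A (Python) =====
-- def is_status_check_request(message: str) -> bool:
--     """Check if the message is requesting application status"""
--     status_keywords = [
--         'check my application status',
--         'application status',
--         'loan status',
--         'status check',
--         'track application',
--         'application tracking',
--         'loan application status',
--         'check status',
--         'my application',
--         'loan details'
--     ]
--
--     message_lower = message.lower()
--     return any(keyword in message_lower for keyword in status_keywords)
-- ===== SOURCE B (Python) =====
-- _STATUS_KEYWORDS = [
--     'check my application status',
--     'application status',
--     'loan status',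
--     'status check',
--     'track application',
--     'application tracking',
--     'loan application status',
--     'check status',
--     'my application',
--     'loan details',
-- ]
--
--
-- def is_status_check_request(message: str) -> bool:
--     """Check if the message is requesting application status.
--
--     Scans the lowered message position by position and tests whether any
--     status keyword starts at that position (instead of a per-keyword
--     substring search over the whole message).
--     """
--     m = message.lower()
--     for i in range(len(m) + 1):
--         for keyword in _STATUS_KEYWORDS:
--             if m.startswith(keyword, i):
--                 return True
--     return False
-- ===== Notes on version B (the rewrite author's own statement) =====
-- stated objective: alternative
-- what changed: Replaced the per-keyword whole-message substring loop with a single position-first scan: for each index of the lowered message, test whether some keyword starts exactly there via startswith.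
import Mathlib
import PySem

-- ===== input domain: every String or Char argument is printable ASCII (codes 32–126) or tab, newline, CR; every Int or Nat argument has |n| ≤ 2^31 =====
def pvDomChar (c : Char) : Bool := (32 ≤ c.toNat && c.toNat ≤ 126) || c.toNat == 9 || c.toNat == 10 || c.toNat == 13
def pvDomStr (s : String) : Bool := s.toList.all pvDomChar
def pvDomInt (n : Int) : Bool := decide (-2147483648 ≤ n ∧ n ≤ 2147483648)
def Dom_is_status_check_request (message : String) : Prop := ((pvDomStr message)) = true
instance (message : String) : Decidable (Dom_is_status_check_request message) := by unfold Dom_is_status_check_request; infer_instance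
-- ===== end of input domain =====

-- B replaces A's per-keyword substring loop by a position-first scan of the lowered
-- message (startswith at each index); alternative decomposition, same exact result.


-- ===== PORT A =====
def statusKeywords : List String :=
  ["check my application status",
   "application status",
   "loan status",
   "status check",
   "track application",
   "application tracking",
   "loan application status",
   "check status",
   "my application",
   "loan details"]

def is_status_check_request (message : String) : Bool :=
  let message_lower := PySem.Str.lower message
  statusKeywords.any (fun keyword => PySem.Str.isIn keyword message_lower)

-- ===== PORT B =====
def is_status_check_request_alt (message : String) : Bool :=
  let m := (PySem.Str.lower message).toList
  (List.range (m.length + 1)).any (fun i =>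
    statusKeywords.any (fun keyword => PySem.Chars.startswith (m.drop i) keyword.toList))

-- ===== PRECONDITION & SPEC =====
def Spec_is_status_check_request (message : String) (out : Bool) : Prop := out = is_status_check_request_alt message
instance (message : String) (out : Bool) : Decidable (Spec_is_status_check_request message out) := by unfold Spec_is_status_check_request; infer_instance

-- ===== CLAIM (what is proved, stated in full; the proofs are below) =====
def Claim_equal_is_status_check_request : Prop := ∀ (message : String), Dom_is_status_check_request message → Spec_is_status_check_request message (is_status_check_request message)

-- ===== LEMMAS AND PROOFS =====

-- 'sub in s' equals the position scan 'some index i ≤ len s where sub is a prefix of s.drop i'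
theorem isIn_eq_range_scan (sub s : List Char) :
    PySem.Chars.isIn sub s =
      (List.range (s.length + 1)).any (fun i => PySem.Chars.startswith (s.drop i) sub) := by
  rcases h : PySem.Chars.isIn sub s with _ | _
  · symm
    rw [List.any_eq_false]
    intro i _
    rw [Bool.not_eq_true, ← Bool.not_eq_true, PySem.Chars.startswith_iff]
    intro hpre
    have : PySem.Chars.isIn sub s = true :=
      (PySem.Chars.exists_prefix_drop_iff_isIn sub s).mp ⟨i, hpre⟩
    simp [h] at this
  · symm
    rw [List.any_eq_true]
    obtain ⟨j, hj⟩ := (PySem.Chars.exists_prefix_drop_iff_isIn sub s).mpr h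
    by_cases hle : j ≤ s.length
    · exact ⟨j, by simp [List.mem_range]; omega,
        (PySem.Chars.startswith_iff _ _).mpr hj⟩
    · -- j past the end: s.drop j = [], so sub = [] and it is also a prefix at index s.length
      have hnil : s.drop j = [] := List.drop_eq_nil_of_le (by omega)
      rw [hnil] at hj
      have hsub : sub = [] := List.prefix_nil.mp hj
      exact ⟨s.length, by simp [List.mem_range],
        (PySem.Chars.startswith_iff _ _).mpr (by simp [hsub])⟩

-- ===== VERDICT (by name: the statement is the Claim_ definition above) =====
theorem is_status_check_request_spec : Claim_equal_is_status_check_request := by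
  intro message _
  unfold Spec_is_status_check_request is_status_check_request is_status_check_request_alt
  simp only [PySem.Str.isIn_eq]
  rw [Bool.eq_iff_iff]
  simp only [List.any_eq_true]
  constructor
  · rintro ⟨kw, hk, hin⟩
    rw [isIn_eq_range_scan, List.any_eq_true] at hin
    obtain ⟨i, hi, hs⟩ := hin
    exact ⟨i, hi, kw, hk, hs⟩
  · rintro ⟨i, hi, kw, hk, hs⟩
    refine ⟨kw, hk, ?_⟩
    rw [isIn_eq_range_scan, List.any_eq_true]
    exact ⟨i, hi, hs⟩
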